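-- pv_equiv track=rewrite | github.com/yeolsim2hajo/Team_hard | wonkyoung/programmers/level 0/문자열_정렬하기_2.py | solution
-- ===== SOURCE A (Python) =====
-- def solution(my_string):
--     answer = ''
--     alp_to_index = {}
--     keys = []
--     for alp in my_string:
--         alp = alp.lower()
--         if alp_to_index.get(alp):
--             alp_to_index[alp] += 1
--         else:
--             alp_to_index[alp] = 1
--             keys.append(alp)
--     keys.sort()
--     for key in keys:
--         answer += key * alp_to_index[key]
--     return answer
-- ===== SOURCE B (Python) =====
-- def solution(my_string):
--     return ''.join(sorted(c.lower() for c in my_string))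
-- ===== Notes on version B (the rewrite author's own statement) =====
-- stated objective: simpler
-- what changed: Replaces the count-dictionary plus keys-list plus key*count rebuild with a direct one-liner: sort the per-character lowercased characters and join them.
import Mathlib
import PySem

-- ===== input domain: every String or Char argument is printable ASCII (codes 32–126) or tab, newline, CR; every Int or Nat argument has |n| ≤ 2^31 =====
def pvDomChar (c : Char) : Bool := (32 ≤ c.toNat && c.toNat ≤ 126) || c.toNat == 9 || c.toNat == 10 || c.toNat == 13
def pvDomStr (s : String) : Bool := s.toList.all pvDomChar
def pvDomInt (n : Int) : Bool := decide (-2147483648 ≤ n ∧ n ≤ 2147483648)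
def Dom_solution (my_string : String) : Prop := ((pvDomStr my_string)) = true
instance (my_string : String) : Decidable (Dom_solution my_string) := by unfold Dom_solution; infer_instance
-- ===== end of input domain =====

-- B replaces A's count-dictionary + keys-list + key*count rebuild with one sort of the per-character lowercased characters.


-- ===== PORT A =====
-- count-dictionary over lowered chars + first-occurrence keys list; keys sorted; answer built as key * count.
-- alp_to_index[key] never raises here (every key in `keys` is in the dict), ported as the total getD _ 0.
def solution (my_string : String) : String :=
  let st := my_string.toList.foldl
    (fun (st : PySem.Dict Char Int × List Char) a =>
      let alp := PySem.Chars.lowerChar a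
      match st.1.get? alp with
      | some v =>
        if v ≠ 0 then (st.1.insert alp (v + 1), st.2)
        else (st.1.insert alp 1, st.2 ++ [alp])
      | none => (st.1.insert alp 1, st.2 ++ [alp]))
    (PySem.Dict.empty, [])
  let keys := PySem.List.sorted st.2 (fun k => k) false
  String.mk (keys.foldl (fun acc k => acc ++ PySem.List.pyRepeat [k] (st.1.getD k 0)) [])

-- ===== PORT B =====
def solution_alt (my_string : String) : String :=
  String.mk (PySem.List.sorted (my_string.toList.map PySem.Chars.lowerChar) (fun c => c) false)

-- ===== PRECONDITION & SPEC =====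
def Spec_solution (my_string : String) (out : String) : Prop := out = solution_alt my_string
instance (my_string : String) (out : String) : Decidable (Spec_solution my_string out) := by unfold Spec_solution; infer_instance

-- ===== CLAIM (what is proved, stated in full; the proofs are below) =====
def Claim_equal_solution : Prop := ∀ (my_string : String), Dom_solution my_string → Spec_solution my_string (solution my_string)

-- ===== LEMMAS AND PROOFS =====

-- A's loop state after a processed prefix L: the dict is the insert-count fold, the keys are set(L) in first-occurrence order.
lemma stateA_eq (L : List Char) :
    L.foldl
      (fun (st : PySem.Dict Char Int × List Char) alp =>
        match st.1.get? alp with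
        | some v =>
          if v ≠ 0 then (st.1.insert alp (v + 1), st.2)
          else (st.1.insert alp 1, st.2 ++ [alp])
        | none => (st.1.insert alp 1, st.2 ++ [alp]))
      (PySem.Dict.empty, []) =
    (L.foldl (fun d x => d.insert x (d.getD x 0 + 1)) (PySem.Dict.empty : PySem.Dict Char Int),
      PySem.Set.ofList L) := by
  induction L using List.reverseRecOn with
  | nil => rfl
  | append_singleton pre c ih =>
    simp only [List.foldl_append, List.foldl_cons, List.foldl_nil, ih,
      PySem.Set.ofList_append_singleton]
    have hkeys : (pre.foldl (fun d x => d.insert x (d.getD x 0 + 1))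
        (PySem.Dict.empty : PySem.Dict Char Int)).keys = PySem.Set.ofList pre := by
      rw [PySem.Dict.keys_foldl_insert]
      simp [PySem.Dict.keys_empty, PySem.Set.update_nil_left]
    cases h : (pre.foldl (fun d x => d.insert x (d.getD x 0 + 1))
        (PySem.Dict.empty : PySem.Dict Char Int)).get? c with
    | none =>
      have hnm : c ∉ pre := by
        have := (PySem.Dict.get?_eq_none_iff_not_mem_keys _ _).mp h
        rw [hkeys, PySem.Set.mem_ofList] at this; exact this
      rw [PySem.Dict.getD_of_get?_eq_none _ _ h, PySem.Set.add_of_not_mem (by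
        rw [PySem.Set.mem_ofList]; exact hnm)]
      norm_num
    | some v =>
      have hm : c ∈ pre := by
        have hc : c ∈ (pre.foldl (fun d x => d.insert x (d.getD x 0 + 1))
            (PySem.Dict.empty : PySem.Dict Char Int)).keys := by
          by_contra hn
          rw [← PySem.Dict.get?_eq_none_iff_not_mem_keys] at hn
          rw [h] at hn; cases hn
        rw [hkeys, PySem.Set.mem_ofList] at hc; exact hc
      have hv : v = (pre.count c : Int) := by
        have h2 := PySem.Dict.getD_of_get?_eq_some _ (0:Int) h
        rw [PySem.Dict.getD_foldl_insert_add_one, PySem.Dict.getD_empty] at h2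
        omega
      have hvne : v ≠ 0 := by
        have : 1 ≤ pre.count c := List.count_pos_iff.mpr hm
        omega
      simp only [if_pos hvne]
      rw [PySem.Dict.getD_of_get?_eq_some _ _ h, PySem.Set.add_of_mem (by
        rw [PySem.Set.mem_ofList]; exact hm)]

lemma count_flatMap_replicate (ks : List Char) (c : Char → Nat) (a : Char) (hnd : ks.Nodup) :
    (ks.flatMap (fun k => List.replicate (c k) k)).count a = if a ∈ ks then c a else 0 := by
  induction ks with
  | nil => simp
  | cons k t ih =>
    rw [List.nodup_cons] at hnd
    rw [List.flatMap_cons, List.count_append, List.count_replicate, ih hnd.2]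
    by_cases hak : a = k
    · subst hak
      simp [hnd.1]
    · simp [hak, Ne.symm hak, List.mem_cons]

lemma pairwise_flatMap_replicate (ks : List Char) (c : Char → Nat) (h : ks.Pairwise (· < ·)) :
    (ks.flatMap (fun k => List.replicate (c k) k)).Pairwise (· ≤ ·) := by
  induction ks with
  | nil => simp
  | cons k t ih =>
    rw [List.pairwise_cons] at h
    rw [List.flatMap_cons, List.pairwise_append]
    refine ⟨List.pairwise_replicate.mpr (Or.inr le_rfl), ih h.2, ?_⟩
    intro a ha b hb
    rw [List.eq_of_mem_replicate ha]
    rcases List.mem_flatMap.mp hb with ⟨k', hk', hb'⟩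
    rw [List.eq_of_mem_replicate hb']
    exact le_of_lt (h.1 k' hk')

-- sorted(L) is the strictly-sorted distinct elements of L, each repeated its multiplicity
lemma sorted_eq_flatMap (L : List Char) :
    PySem.List.sorted L (fun c => c) false =
      (PySem.List.sorted (PySem.Set.ofList L) (fun k => k) false).flatMap
        (fun k => List.replicate (L.count k) k) := by
  set ks := PySem.List.sorted (PySem.Set.ofList L) (fun k => k) false with hks
  have hperm : ks.Perm (PySem.Set.ofList L) := PySem.List.sorted_perm _ _ _
  have hnd : ks.Nodup := hperm.nodup_iff.mpr (PySem.Set.nodup_ofList _)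
  have hmem : ∀ a, a ∈ ks ↔ a ∈ L := by
    intro a
    rw [hperm.mem_iff, PySem.Set.mem_ofList]
  apply PySem.List.sorted_id_eq_of_perm_of_pairwise
  · apply List.perm_iff_count.mpr
    intro a
    rw [count_flatMap_replicate _ _ _ hnd]
    by_cases ha : a ∈ ks
    · simp [ha]
    · simp [ha, List.count_eq_zero.mpr (fun hm => ha ((hmem a).mpr hm))]
  · exact pairwise_flatMap_replicate _ _ (PySem.List.sorted_ofList_pairwise_lt _)

-- ===== VERDICT (by name: the statement is the Claim_ definition above) =====
theorem solution_spec : Claim_equal_solution := by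
  intro s _
  unfold Spec_solution solution solution_alt
  dsimp only
  rw [← List.foldl_map (f := PySem.Chars.lowerChar)
      (g := fun (st : PySem.Dict Char Int × List Char) alp =>
        match st.1.get? alp with
        | some v =>
          if v ≠ 0 then (st.1.insert alp (v + 1), st.2)
          else (st.1.insert alp 1, st.2 ++ [alp])
        | none => (st.1.insert alp 1, st.2 ++ [alp]))]
  rw [stateA_eq]
  rw [PySem.List.foldl_append_eq_flatMap]
  rw [sorted_eq_flatMap (s.toList.map PySem.Chars.lowerChar)]
  congr 1
  apply List.flatMap_congr
  intro k hk
  rw [PySem.List.pyRepeat_singleton, PySem.Dict.getD_foldl_insert_add_one, PySem.Dict.getD_empty]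
  simp
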